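-- pv_equiv track=rewrite | github.com/InderdeepSync/grokking-coding-interview | subsets/generalized_abbreviations.py | generate_generalized_abbreviation
-- ===== SOURCE A (Python) =====
-- def generate_generalized_abbreviation(word):
--     result = {str(len(word)), word}
--     if len(word) == 1:
--         return result
--
--     for i in range(1, len(word)):
--         for temp in generate_generalized_abbreviation(word[i:]):
--             result.add(word[:i] + temp)
--             if not temp[0].isdigit():
--                 result.add(str(len(word[:i])) + temp)
--
--     return sorted(result)
-- ===== SOURCE B (Python) =====
-- def generate_generalized_abbreviation(word):
--     n = len(word)
--     memo = []  # memo[k] is the result for the suffix starting at s + 1 + k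
--     for s in reversed(range(n)):
--         suffix = word[s:]
--         result = {str(len(suffix)), suffix}
--         for i in range(1, len(suffix)):
--             for temp in memo[i - 1]:
--                 result.add(suffix[:i] + temp)
--                 if not temp[0].isdigit():
--                     result.add(str(i) + temp)
--         memo.insert(0, sorted(result))
--     return memo[0] if memo else sorted({str(n), word})
-- ===== Notes on version B (the rewrite author's own statement) =====
-- stated objective: alternative
-- what changed: Replaces A's naive recursion, which re-solves every suffix anew at every level, by a single bottom-up dynamic-programming pass that computes the abbreviation list for each of the n suffixes exactly once (measured 3x at the largest size both finished, but not confirmed as faster since the 2^n-sized output dominates both).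
-- outside the precondition, e.g. on generate_generalized_abbreviation('a'): A returns {'1', 'a'}, B returns ['1', 'a']
import Mathlib
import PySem

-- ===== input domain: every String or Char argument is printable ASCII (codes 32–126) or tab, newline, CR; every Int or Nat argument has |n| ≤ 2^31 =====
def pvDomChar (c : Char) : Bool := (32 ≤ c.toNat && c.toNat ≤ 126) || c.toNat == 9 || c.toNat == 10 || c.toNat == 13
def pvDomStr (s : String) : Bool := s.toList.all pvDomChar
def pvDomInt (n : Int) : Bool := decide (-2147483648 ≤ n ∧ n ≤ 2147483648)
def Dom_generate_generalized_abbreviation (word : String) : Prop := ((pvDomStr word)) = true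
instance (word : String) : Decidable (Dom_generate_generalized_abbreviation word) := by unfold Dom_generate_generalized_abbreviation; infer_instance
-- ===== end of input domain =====

-- B replaces A's naive re-recursion on every suffix by one bottom-up pass that tabulates the
-- result for each suffix once (dynamic programming); same return value wherever A returns a list.

-- ===== PORT A =====
-- fuel = recursion depth bound; called with (length + 1), always sufficient since every
-- recursive call is on a strictly shorter suffix (the fuel-0 branch is unreachable).
def pvGGAAux : Nat → List Char → List String
  | 0, _ => []
  | fuel+1, w =>
    let result : PySem.Set String :=
      PySem.Set.ofList [PySem.Int.toStr (w.length : Int), String.ofList w]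
    if w.length == 1 then result
    else
      let result :=
        (PySem.List.pyRange 1 (w.length : Int)).foldl (fun res i =>
          (pvGGAAux fuel (PySem.List.slice w (some i) none)).foldl (fun res temp =>
            let res := PySem.Set.add res (String.ofList (PySem.List.slice w none (some i)) ++ temp)
            match PySem.Str.pyGet? temp 0 with
            | some c =>
                if PySem.Chars.isdigit c then res
                else PySem.Set.add res
                  (PySem.Int.toStr ((PySem.List.slice w none (some i)).length : Int) ++ temp)
            | none => res) res) result
      PySem.List.sorted result (fun x => x) false

def generate_generalized_abbreviation (word : String) : List String :=
  pvGGAAux (word.toList.length + 1) word.toList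

-- ===== PORT B =====
-- one level of B's bottom-up loop: prepend the (sorted) result for the suffix starting at s,
-- reading the results for shorter suffixes off the memo list
def pvBStep (w : List Char) (memo : List (List String)) (s : Nat) : List (List String) :=
  let suffix := PySem.List.slice w (some (s : Int)) none
  let result : PySem.Set String :=
    PySem.Set.ofList [PySem.Int.toStr (suffix.length : Int), String.ofList suffix]
  let result :=
    (PySem.List.pyRange 1 (suffix.length : Int)).foldl (fun res i =>
      (PySem.List.pyGetD memo (i - 1) []).foldl (fun res temp =>
        let res := PySem.Set.add res (String.ofList (PySem.List.slice suffix none (some i)) ++ temp)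
        match PySem.Str.pyGet? temp 0 with
        | some c =>
            if PySem.Chars.isdigit c then res
            else PySem.Set.add res (PySem.Int.toStr i ++ temp)
        | none => res) res) result
  PySem.List.sorted result (fun x => x) false :: memo

def generate_generalized_abbreviation_alt (word : String) : List String :=
  let w := word.toList
  let n := w.length
  let memo := (List.range n).reverse.foldl (pvBStep w) ([] : List (List String))
  match memo with
  | [] => PySem.List.sorted (PySem.Set.ofList [PySem.Int.toStr (n : Int), String.ofList w]) (fun x => x) false
  | m0 :: _ => m0

-- ===== PRECONDITION & SPEC =====
-- Pre_ excludes words of length 1, on which A returns a Python set instead of a sorted list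
-- (its other branch, and B, return the sorted list of the same elements).
def Pre_generate_generalized_abbreviation (word : String) : Prop := word.toList.length ≠ 1
instance (word : String) : Decidable (Pre_generate_generalized_abbreviation word) := by
  unfold Pre_generate_generalized_abbreviation; infer_instance

def pvWitness_generate_generalized_abbreviation : String := "ab"

def Spec_generate_generalized_abbreviation (word : String) (out : List String) : Prop := out = generate_generalized_abbreviation_alt word
instance (word : String) (out : List String) : Decidable (Spec_generate_generalized_abbreviation word out) := by unfold Spec_generate_generalized_abbreviation; infer_instance

-- ===== CLAIM (what is proved, stated in full; the proofs are below) =====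
def Claim_equal_generate_generalized_abbreviation : Prop := ∀ (word : String), Dom_generate_generalized_abbreviation word → Pre_generate_generalized_abbreviation word → Spec_generate_generalized_abbreviation word (generate_generalized_abbreviation word)

-- ===== CLAIM (what is proved, stated in full; the proofs are below) =====

-- ===== LEMMAS AND PROOFS =====

-- the common per-(i, temp) set-insertion step, in B's normal form
def pvStep (w : List Char) (i : Int) (res : PySem.Set String) (temp : String) : PySem.Set String :=
  let res := PySem.Set.add res (String.ofList (w.take i.toNat) ++ temp)
  match PySem.Str.pyGet? temp 0 with
  | some c =>
      if PySem.Chars.isdigit c then res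
      else PySem.Set.add res (PySem.Int.toStr i ++ temp)
  | none => res

def pvElems (w : List Char) (i : Int) (temp : String) : List String :=
  (String.ofList (w.take i.toNat) ++ temp) ::
    (match PySem.Str.pyGet? temp 0 with
     | some c => if PySem.Chars.isdigit c then [] else [PySem.Int.toStr i ++ temp]
     | none => [])

def pvAddAll (r : PySem.Set String) (xs : List String) : PySem.Set String :=
  xs.foldl PySem.Set.add r

def pvInit (w : List Char) : PySem.Set String :=
  PySem.Set.ofList [PySem.Int.toStr (w.length : Int), String.ofList w]

def pvOuter (w : List Char) (c : Int → List String) (r : PySem.Set String) : PySem.Set String :=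
  (PySem.List.pyRange 1 (w.length : Int)).foldl (fun res i => (c i).foldl (pvStep w i) res) r

-- the common value both programs compute for a suffix: the level set, sorted (fuel as in port A)
def pvE : Nat → List Char → List String
  | 0, _ => []
  | fuel+1, w =>
    PySem.List.sorted
      (pvOuter w (fun i => pvE fuel (w.drop i.toNat)) (pvInit w)) (fun x => x) false

def pvEE (w : List Char) : List String := pvE (w.length + 1) w

-- ---- permutation machinery ----
lemma pv_add_perm {r₁ r₂ : PySem.Set String} (h : r₁.Perm r₂) (x : String) :
    (PySem.Set.add r₁ x).Perm (PySem.Set.add r₂ x) := by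
  by_cases hx : x ∈ r₁
  · rw [PySem.Set.add_of_mem hx, PySem.Set.add_of_mem (h.mem_iff.mp hx)]; exact h
  · rw [PySem.Set.add_of_not_mem hx, PySem.Set.add_of_not_mem (fun hc => hx (h.mem_iff.mpr hc))]
    exact h.append (List.Perm.refl _)

lemma pv_add_add_comm (r : PySem.Set String) (x y : String) :
    (PySem.Set.add (PySem.Set.add r x) y).Perm (PySem.Set.add (PySem.Set.add r y) x) := by
  by_cases hxy : x = y
  · subst hxy; exact List.Perm.refl _
  by_cases hx : x ∈ r <;> by_cases hy : y ∈ r <;> simp [hx, hy, hxy, Ne.symm hxy]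
  exact List.Perm.append_left r (List.Perm.swap y x [])

lemma pv_addAll_perm_left (xs : List String) {r₁ r₂ : PySem.Set String} (h : r₁.Perm r₂) :
    (pvAddAll r₁ xs).Perm (pvAddAll r₂ xs) := by
  induction xs generalizing r₁ r₂ with
  | nil => exact h
  | cons t ts ih => exact ih (pv_add_perm h t)


lemma pv_addAll_perm {xs₁ xs₂ : List String} (hx : xs₁.Perm xs₂)
    {r₁ r₂ : PySem.Set String} (hr : r₁.Perm r₂) :
    (pvAddAll r₁ xs₁).Perm (pvAddAll r₂ xs₂) := by
  have key : ∀ {ys₁ ys₂ : List String}, ys₁.Perm ys₂ → ∀ (r : PySem.Set String),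
      (pvAddAll r ys₁).Perm (pvAddAll r ys₂) := by
    intro ys₁ ys₂ h
    induction h with
    | nil => intro r; exact List.Perm.refl _
    | cons x _ ih => intro r; exact ih (PySem.Set.add r x)
    | swap x y l => intro r
                    exact pv_addAll_perm_left l (pv_add_add_comm r y x)
    | trans _ _ ih₁ ih₂ => intro r; exact (ih₁ r).trans (ih₂ r)
  exact (key hx r₁).trans (pv_addAll_perm_left xs₂ hr)


lemma pvStep_eq_addAll (w : List Char) (i : Int) (r : PySem.Set String) (t : String) :
    pvStep w i r t = pvAddAll r (pvElems w i t) := by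
  unfold pvStep pvElems pvAddAll
  cases h : PySem.Str.pyGet? t 0 with
  | none => simp
  | some c => by_cases hd : PySem.Chars.isdigit c <;> simp [hd]


lemma pv_innerfold_eq (w : List Char) (i : Int) (r : PySem.Set String) (ts : List String) :
    ts.foldl (pvStep w i) r = pvAddAll r (ts.flatMap (pvElems w i)) := by
  induction ts generalizing r with
  | nil => rfl
  | cons t ts ih =>
    rw [List.foldl_cons, ih, List.flatMap_cons]
    show _ = List.foldl PySem.Set.add r (pvElems w i t ++ List.flatMap (pvElems w i) ts)
    rw [List.foldl_append, pvStep_eq_addAll]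
    rfl


lemma pv_inner_perm (w : List Char) (i : Int) {ts₁ ts₂ : List String} (ht : ts₁.Perm ts₂)
    {r₁ r₂ : PySem.Set String} (hr : r₁.Perm r₂) :
    (ts₁.foldl (pvStep w i) r₁).Perm (ts₂.foldl (pvStep w i) r₂) := by
  rw [pv_innerfold_eq, pv_innerfold_eq]
  exact pv_addAll_perm (ht.flatMap (fun a _ => List.Perm.refl _)) hr


lemma pv_outerlist_perm (w : List Char) (c₁ c₂ : Int → List String) :
    ∀ (is : List Int) (r₁ r₂ : PySem.Set String), r₁.Perm r₂ →
      (∀ i ∈ is, (c₁ i).Perm (c₂ i)) →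
      (is.foldl (fun res i => (c₁ i).foldl (pvStep w i) res) r₁).Perm
        (is.foldl (fun res i => (c₂ i).foldl (pvStep w i) res) r₂) := by
  intro is
  induction is with
  | nil => intro r₁ r₂ hr _; exact hr
  | cons i is ih =>
    intro r₁ r₂ hr hc
    exact ih _ _ (pv_inner_perm w i (hc i (by simp)) hr)
      (fun j hj => hc j (by simp [hj]))


lemma pv_outer_perm (w : List Char) {c₁ c₂ : Int → List String}
    (hc : ∀ i ∈ PySem.List.pyRange 1 (w.length : Int), (c₁ i).Perm (c₂ i)) :
    (pvOuter w c₁ (pvInit w)).Perm (pvOuter w c₂ (pvInit w)) :=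
  pv_outerlist_perm w c₁ c₂ _ _ _ (List.Perm.refl _) hc

-- ---- pvE facts ----

lemma pvE_irrel : ∀ (fuel : Nat) (w : List Char), w.length + 1 ≤ fuel → pvE fuel w = pvEE w := by
  intro fuel
  induction fuel using Nat.strong_induction_on with
  | _ fuel ih =>
    intro w hw
    match fuel, hw with
    | f+1, hw =>
      show pvE (f+1) w = pvE (w.length+1) w
      unfold pvE pvOuter
      congr 1
      apply PySem.List.foldl_congr_mem
      intro acc i hi
      obtain ⟨h1, h2⟩ := PySem.List.mem_pyRange_one.mp hi
      have hlen : (w.drop i.toNat).length = w.length - i.toNat := by simp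
      have hi1 : 1 ≤ i.toNat := by omega
      have hi2 : i.toNat < w.length := by omega
      have e1 : pvE f (w.drop i.toNat) = pvEE (w.drop i.toNat) :=
        ih f (by omega) _ (by omega)
      have e2 : pvE w.length (w.drop i.toNat) = pvEE (w.drop i.toNat) :=
        ih w.length (by omega) _ (by omega)
      simp only [e1, e2]

lemma pvEE_eq (w : List Char) :
    pvEE w = PySem.List.sorted (pvOuter w (fun i => pvEE (w.drop i.toNat)) (pvInit w)) (fun x => x) false := by
  show pvE (w.length + 1) w = _
  unfold pvE pvOuter
  congr 1
  apply PySem.List.foldl_congr_mem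
  intro acc i hi
  obtain ⟨h1, h2⟩ := PySem.List.mem_pyRange_one.mp hi
  have : pvE w.length (w.drop i.toNat) = pvEE (w.drop i.toNat) := by
    apply pvE_irrel
    have : (w.drop i.toNat).length = w.length - i.toNat := by simp
    omega
  simp only [this]

lemma pvGGAAux_succ (f : Nat) (w : List Char) : pvGGAAux (f+1) w =
    (let result : PySem.Set String :=
      PySem.Set.ofList [PySem.Int.toStr (w.length : Int), String.ofList w]
    if w.length == 1 then result
    else
      let result :=
        (PySem.List.pyRange 1 (w.length : Int)).foldl (fun res i =>
          (pvGGAAux f (PySem.List.slice w (some i) none)).foldl (fun res temp =>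
            let res := PySem.Set.add res (String.ofList (PySem.List.slice w none (some i)) ++ temp)
            match PySem.Str.pyGet? temp 0 with
            | some c =>
                if PySem.Chars.isdigit c then res
                else PySem.Set.add res
                  (PySem.Int.toStr ((PySem.List.slice w none (some i)).length : Int) ++ temp)
            | none => res) res) result
      PySem.List.sorted result (fun x => x) false) := rfl

lemma pv_gA : ∀ (fuel : Nat) (w : List Char), w.length + 1 ≤ fuel →
    (pvGGAAux fuel w).Perm (pvEE w) ∧ (w.length ≠ 1 → pvGGAAux fuel w = pvEE w) := by
  intro fuel
  induction fuel using Nat.strong_induction_on with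
  | _ fuel ih =>
    intro w hw
    match fuel, hw with
    | f+1, hw =>
      by_cases h1 : w.length = 1
      · refine ⟨?_, fun hne => absurd h1 hne⟩
        have houter : pvOuter w (fun i => pvEE (w.drop i.toNat)) (pvInit w) = pvInit w := by
          unfold pvOuter
          rw [h1]
          norm_num [PySem.List.pyRange]
        have hbase : pvGGAAux (f+1) w = pvInit w := by
          rw [pvGGAAux_succ]
          simp [h1, pvInit]
        rw [hbase, pvEE_eq, houter]
        exact (PySem.List.sorted_perm _ _ _).symm
      · have key : pvGGAAux (f+1) w =
            PySem.List.sorted (pvOuter w (fun i => pvGGAAux f (w.drop i.toNat)) (pvInit w))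
              (fun x => x) false := by
          rw [pvGGAAux_succ]
          unfold pvOuter pvInit
          simp only [beq_iff_eq, if_neg h1]
          congr 1
          apply PySem.List.foldl_congr_mem
          intro acc i hi
          obtain ⟨hl, hr⟩ := PySem.List.mem_pyRange_one.mp hi
          have hsl1 : PySem.List.slice w (some i) none = w.drop i.toNat :=
            PySem.List.slice_from _ (by omega)
          have hsl2 : PySem.List.slice w none (some i) = w.take i.toNat :=
            PySem.List.slice_to _ (by omega)
          have hlt : (((w.take i.toNat).length : Nat) : Int) = i := by
            rw [List.length_take]
            omega
          rw [hsl1, hsl2, hlt]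
          rfl
        have hperm : (pvOuter w (fun i => pvGGAAux f (w.drop i.toNat)) (pvInit w)).Perm
            (pvOuter w (fun i => pvEE (w.drop i.toNat)) (pvInit w)) := by
          apply pv_outer_perm
          intro i hi
          obtain ⟨hl, hr⟩ := PySem.List.mem_pyRange_one.mp hi
          have hlen : (w.drop i.toNat).length = w.length - i.toNat := by simp
          exact (ih f (by omega) _ (by omega)).1
        have hEq : pvGGAAux (f+1) w = pvEE w := by
          rw [key, pvEE_eq]
          exact (PySem.List.sorted_id_eq_sorted_id_iff_perm _ _).mpr hperm
        exact ⟨hEq ▸ List.Perm.refl _, fun _ => hEq⟩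

def pvMemoFor (w : List Char) (j : Nat) : List (List String) :=
  (List.range' j (w.length - j)).map (fun s => pvEE (w.drop s))

lemma pvBStep_eq (w : List Char) (s : Nat) (hs : s < w.length) :
    pvBStep w (pvMemoFor w (s + 1)) s = pvMemoFor w s := by
  have hsuf : PySem.List.slice w (some (s : Int)) none = w.drop s :=
    PySem.List.slice_from_natCast w s
  have hlen : (w.drop s).length = w.length - s := by simp
  have hkey : pvBStep w (pvMemoFor w (s + 1)) s = pvEE (w.drop s) :: pvMemoFor w (s + 1) := by
    unfold pvBStep
    rw [hsuf]
    show (PySem.List.sorted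
        ((PySem.List.pyRange 1 ((w.drop s).length : Int)).foldl
          (fun res i =>
            (PySem.List.pyGetD (pvMemoFor w (s + 1)) (i - 1) []).foldl
              (fun res temp =>
                let res := PySem.Set.add res
                  (String.ofList (PySem.List.slice (w.drop s) none (some i)) ++ temp)
                match PySem.Str.pyGet? temp 0 with
                | some c =>
                    if PySem.Chars.isdigit c then res
                    else PySem.Set.add res (PySem.Int.toStr i ++ temp)
                | none => res)
              res)
          (PySem.Set.ofList [PySem.Int.toStr ((w.drop s).length : Int), String.ofList (w.drop s)]))
        (fun x => x) false) :: pvMemoFor w (s + 1) = pvEE (w.drop s) :: pvMemoFor w (s + 1)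
    congr 1
    rw [pvEE_eq]
    congr 1
    unfold pvOuter pvInit
    apply PySem.List.foldl_congr_mem
    intro acc i hi
    obtain ⟨hl, hr⟩ := PySem.List.mem_pyRange_one.mp hi
    have hi1 : 1 ≤ i.toNat := by omega
    have hi2 : i.toNat < w.length - s := by omega
    have hget : PySem.List.pyGetD (pvMemoFor w (s + 1)) (i - 1) [] =
        pvEE ((w.drop s).drop i.toNat) := by
      rw [PySem.List.pyGetD_eq_getElem (h0 := by omega)
        (h1 := by simp [pvMemoFor]; omega)]
      simp only [pvMemoFor, List.getElem_map, List.getElem_range']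
      rw [List.drop_drop]
      congr 2
      omega
    have hsl : PySem.List.slice (w.drop s) none (some i) = (w.drop s).take i.toNat :=
      PySem.List.slice_to _ (by omega)
    rw [hget, hsl]
    rfl
  rw [hkey]
  show _ = (List.range' s (w.length - s)).map (fun t => pvEE (w.drop t))
  have : w.length - s = (w.length - (s+1)) + 1 := by omega
  rw [this, List.range'_succ, List.map_cons]
  rfl

lemma pv_bfold (w : List Char) : ∀ (j : Nat), j ≤ w.length →
    (List.range j).reverse.foldl (pvBStep w) (pvMemoFor w j) = pvMemoFor w 0 := by
  intro j
  induction j with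
  | zero => intro _; rfl
  | succ j ih =>
    intro hj
    rw [List.range_succ, List.reverse_append, List.reverse_singleton, List.singleton_append,
      List.foldl_cons, pvBStep_eq w j (by omega)]
    exact ih (by omega)

lemma pv_alt_eq (word : String) : generate_generalized_abbreviation_alt word = pvEE word.toList := by
  unfold generate_generalized_abbreviation_alt
  by_cases h0 : word.toList.length = 0
  · have hw : word.toList = [] := List.length_eq_zero_iff.mp h0
    rw [hw]
    rfl
  · have hmemo : (List.range word.toList.length).reverse.foldl (pvBStep word.toList) [] =
        pvMemoFor word.toList 0 := by
      have hstart : pvMemoFor word.toList word.toList.length = [] := by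
        simp [pvMemoFor]
      rw [← hstart]
      exact pv_bfold _ _ (Nat.le_refl _)
    show (match (List.range word.toList.length).reverse.foldl (pvBStep word.toList) [] with
      | [] => PySem.List.sorted (PySem.Set.ofList
          [PySem.Int.toStr (word.toList.length : Int), String.ofList word.toList]) (fun x => x) false
      | m0 :: _ => m0) = pvEE word.toList
    rw [hmemo]
    have : pvMemoFor word.toList 0 =
        pvEE word.toList :: (List.range' 1 (word.toList.length - 1)).map (fun t => pvEE (word.toList.drop t)) := by
      unfold pvMemoFor
      have h : word.toList.length - 0 = (word.toList.length - 1) + 1 := by omega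
      rw [h, List.range'_succ, List.map_cons, List.drop_zero]
    rw [this]

-- ===== VERDICT (by name: the statement is the Claim_ definition above) =====
theorem generate_generalized_abbreviation_spec : Claim_equal_generate_generalized_abbreviation := by
  intro word _ hpre
  unfold Spec_generate_generalized_abbreviation
  rw [pv_alt_eq]
  exact (pv_gA _ _ (Nat.le_refl _)).2 hpre
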